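-- pv_equiv track=rewrite | github.com/umd-psycholing/lm-syntactic-generalization | src/grammar_utilities.py | _expand_string_element
-- ===== SOURCE A (Python) =====
-- def _expand_string_element(input_sentence: list, replacement_non_terminal: str, replacement_expansions: list) -> list[list]:
--     """There are two ways a non-terminal can be represented in an input grammar. This method handles string non-terminals.
--
--     Args:
--         input_sentence (list): sentence which will have its first non-terminal (string) entry expanded
--         replacement_non_terminal (str): element which is to be expanded
--         replacement_expansions (list): possible expansions (found within grammar) that will replace the non-terminal in the outputs
--
--     Returns:
--         list[list]: list of sentences. Original sentence with the non-terminal replaced with an expansion, for each expansion.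
--     """
--     resulting_sentences = []
--     for expansion in replacement_expansions:
--         expansion_sentence = []
--         for element in input_sentence:
--             if element != replacement_non_terminal:
--                 expansion_sentence.append(element)
--             else:
--                 expansion_sentence.extend(expansion)
--         resulting_sentences.append(expansion_sentence)
--     return resulting_sentences
-- ===== SOURCE B (Python) =====
-- def _expand_string_element(input_sentence: list, replacement_non_terminal: str, replacement_expansions: list) -> list:
--     # Scan the sentence once, splitting it into segments delimited by the
--     # non-terminal; then assemble one output per expansion by interleaving.
--     segments = []
--     current = []
--     for element in input_sentence:
--         if element == replacement_non_terminal: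
--             segments.append(current)
--             current = []
--         else:
--             current.append(element)
--     segments.append(current)
--     results = []
--     for expansion in replacement_expansions:
--         sentence = list(segments[0])
--         for segment in segments[1:]:
--             sentence.extend(expansion)
--             sentence.extend(segment)
--         results.append(sentence)
--     return results
-- ===== Notes on version B (the rewrite author's own statement) =====
-- stated objective: alternative
-- what changed: B scans the sentence once to split it into segments delimited by the non-terminal, then builds each output by interleaving the expansion between the precomputed segments, instead of A's per-expansion element-by-element scan-and-branch.
import Mathlib
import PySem

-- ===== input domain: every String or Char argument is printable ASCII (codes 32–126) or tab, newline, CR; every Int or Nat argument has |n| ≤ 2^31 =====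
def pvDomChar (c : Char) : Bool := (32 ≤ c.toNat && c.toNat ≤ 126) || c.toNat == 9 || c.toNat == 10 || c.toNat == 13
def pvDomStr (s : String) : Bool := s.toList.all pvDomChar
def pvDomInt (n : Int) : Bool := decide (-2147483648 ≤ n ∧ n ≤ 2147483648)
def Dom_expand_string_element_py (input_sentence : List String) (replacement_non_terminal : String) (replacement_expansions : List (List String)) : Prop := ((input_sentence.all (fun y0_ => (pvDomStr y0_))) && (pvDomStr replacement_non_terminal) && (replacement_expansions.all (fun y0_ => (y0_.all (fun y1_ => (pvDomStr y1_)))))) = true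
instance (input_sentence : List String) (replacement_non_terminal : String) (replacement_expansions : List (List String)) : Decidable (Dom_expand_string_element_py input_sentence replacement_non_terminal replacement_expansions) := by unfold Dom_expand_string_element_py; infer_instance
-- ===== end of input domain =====

-- B replaces A's per-expansion scan-and-branch over the sentence by a single
-- segmentation pass followed by interleaving (objective: alternative decomposition).

-- ===== PORT A =====
def expand_string_element_py (input_sentence : List String) (replacement_non_terminal : String) (replacement_expansions : List (List String)) : List (List String) :=
  replacement_expansions.foldl (fun resulting_sentences expansion =>
    resulting_sentences ++
      [input_sentence.foldl (fun expansion_sentence element =>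
        if element ≠ replacement_non_terminal then expansion_sentence ++ [element]
        else expansion_sentence ++ expansion) []]) []

-- ===== PORT B =====
-- single segmentation pass: state is (finished segments, current segment)
def pvSegLoop (nt : String) (st : List (List String) × List String) (xs : List String) : List (List String) × List String :=
  match xs with
  | [] => st
  | x :: rest =>
      if x = nt then pvSegLoop nt (st.1 ++ [st.2], []) rest
      else pvSegLoop nt (st.1, st.2 ++ [x]) rest

-- assembly loop over segments[1:]: extend with the expansion, then the segment
def pvAssemble (expansion : List String) (acc : List String) (segs : List (List String)) : List String :=
  segs.foldl (fun sentence seg => sentence ++ expansion ++ seg) acc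

def expand_string_element_py_alt (input_sentence : List String) (replacement_non_terminal : String) (replacement_expansions : List (List String)) : List (List String) :=
  let st := pvSegLoop replacement_non_terminal ([], []) input_sentence
  let segments := st.1 ++ [st.2]
  replacement_expansions.map (fun expansion =>
    match segments with
    | [] => []            -- unreachable: segments always nonempty
    | h :: t => pvAssemble expansion h t)

-- ===== PRECONDITION & SPEC =====
def Spec_expand_string_element_py (input_sentence : List String) (replacement_non_terminal : String) (replacement_expansions : List (List String)) (out : List (List String)) : Prop := out = expand_string_element_py_alt input_sentence replacement_non_terminal replacement_expansions
instance (input_sentence : List String) (replacement_non_terminal : String) (replacement_expansions : List (List String)) (out : List (List String)) : Decidable (Spec_expand_string_element_py input_sentence replacement_non_terminal replacement_expansions out) := by unfold Spec_expand_string_element_py; infer_instance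

-- ===== CLAIM (what is proved, stated in full; the proofs are below) =====
def Claim_equal_expand_string_element_py : Prop := ∀ (input_sentence : List String) (replacement_non_terminal : String) (replacement_expansions : List (List String)), Dom_expand_string_element_py input_sentence replacement_non_terminal replacement_expansions → Spec_expand_string_element_py input_sentence replacement_non_terminal replacement_expansions (expand_string_element_py input_sentence replacement_non_terminal replacement_expansions)

-- ===== LEMMAS AND PROOFS =====

-- pure (accumulator-free) segmentation, the proof's reference shape
def pvPureSegs (nt : String) : List String → List (List String)
  | [] => [[]]
  | x :: xs =>
      if x = nt then [] :: pvPureSegs nt xs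
      else
        match pvPureSegs nt xs with
        | h :: t => (x :: h) :: t
        | [] => [[x]]

def pvConsHead (c : List String) : List (List String) → List (List String)
  | [] => [c]
  | h :: t => (c ++ h) :: t

def pvInterTail (expansion : List String) : List (List String) → List String
  | [] => []
  | s :: t => expansion ++ s ++ pvInterTail expansion t

def pvJoin (expansion : List String) : List (List String) → List String
  | [] => []
  | h :: t => h ++ pvInterTail expansion t

theorem pvPureSegs_ne_nil (nt : String) (xs : List String) : pvPureSegs nt xs ≠ [] := by
  induction xs with
  | nil => simp [pvPureSegs]
  | cons x xs ih =>
    simp only [pvPureSegs]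
    split
    · simp
    · cases h : pvPureSegs nt xs with
      | nil => simp
      | cons a t => simp

theorem pvSegLoop_spec (nt : String) (xs : List String) :
    ∀ S C, (pvSegLoop nt (S, C) xs).1 ++ [(pvSegLoop nt (S, C) xs).2]
      = S ++ pvConsHead C (pvPureSegs nt xs) := by
  induction xs with
  | nil => intro S C; simp [pvSegLoop, pvPureSegs, pvConsHead]
  | cons x xs ih =>
    intro S C
    simp only [pvSegLoop, pvPureSegs]
    by_cases hx : x = nt
    · rw [if_pos hx, if_pos hx, ih]
      cases h : pvPureSegs nt xs with
      | nil => exact absurd h (pvPureSegs_ne_nil nt xs)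
      | cons a t => simp [pvConsHead]
    · rw [if_neg hx, if_neg hx, ih]
      cases h : pvPureSegs nt xs with
      | nil => exact absurd h (pvPureSegs_ne_nil nt xs)
      | cons a t => simp [pvConsHead]

theorem pvAssemble_spec (expansion : List String) (t : List (List String)) :
    ∀ acc, pvAssemble expansion acc t = acc ++ pvInterTail expansion t := by
  induction t with
  | nil => intro acc; simp [pvAssemble, pvInterTail]
  | cons s t ih =>
    intro acc
    simp only [pvAssemble, List.foldl_cons] at *
    rw [ih, pvInterTail]
    simp

-- A's inner loop, accumulator-generalized, equals join of the pure segments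
theorem pvInner_spec (nt : String) (expansion : List String) (xs : List String) :
    ∀ acc, xs.foldl (fun es element =>
        if element ≠ nt then es ++ [element] else es ++ expansion) acc
      = acc ++ pvJoin expansion (pvPureSegs nt xs) := by
  induction xs with
  | nil => intro acc; simp [pvJoin, pvPureSegs, pvInterTail]
  | cons x xs ih =>
    intro acc
    simp only [List.foldl_cons]
    rw [ih]
    by_cases hx : x = nt
    · simp only [hx, ne_eq, not_true_eq_false, if_false, pvPureSegs]
      cases h : pvPureSegs nt xs with
      | nil => exact absurd h (pvPureSegs_ne_nil nt xs)
      | cons a t => simp [pvJoin, pvInterTail]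
    · simp only [ne_eq, hx, not_false_eq_true, if_true, pvPureSegs]
      cases h : pvPureSegs nt xs with
      | nil => exact absurd h (pvPureSegs_ne_nil nt xs)
      | cons a t => simp [pvJoin]

-- A's outer loop, accumulator-generalized, is a map
theorem pvOuter_spec (f : List String → List String) (exps : List (List String)) :
    ∀ acc, exps.foldl (fun res e => res ++ [f e]) acc = acc ++ exps.map f := by
  induction exps with
  | nil => intro acc; simp
  | cons e exps ih => intro acc; simp [List.foldl_cons, ih]

theorem pv_main (xs : List String) (nt : String) (exps : List (List String)) :
    expand_string_element_py xs nt exps = expand_string_element_py_alt xs nt exps := by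
  unfold expand_string_element_py expand_string_element_py_alt
  rw [pvOuter_spec]
  simp only [List.nil_append]
  have hseg := pvSegLoop_spec nt xs [] []
  apply List.map_congr_left
  intro e _
  rw [pvInner_spec]
  simp only [List.nil_append]
  cases hl : (pvSegLoop nt ([], []) xs).1 ++ [(pvSegLoop nt ([], []) xs).2] with
  | nil => simp at hl
  | cons h t =>
    rw [hl] at hseg
    have hps : pvPureSegs nt xs = h :: t := by
      cases hp : pvPureSegs nt xs with
      | nil => exact absurd hp (pvPureSegs_ne_nil nt xs)
      | cons a b =>
        rw [hp, pvConsHead] at hseg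
        simp at hseg
        simp [hseg.1, hseg.2]
    rw [hps]
    simp [pvJoin, pvAssemble_spec]

-- ===== VERDICT (by name: the statement is the Claim_ definition above) =====
theorem expand_string_element_py_spec : Claim_equal_expand_string_element_py := by
  intro xs nt exps _
  unfold Spec_expand_string_element_py
  exact pv_main xs nt exps
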